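-- pv_equiv track=rewrite | github.com/gukz/usefulscripts | leetcode/contest/W185/format_char_num.py | format_str_num1
-- ===== SOURCE A (Python) =====
-- def format_str_num1(origin):
--     chars = []
--     nums = []
--     for c in origin:
--         if c.isdigit():
--             nums.append(c)
--         else:
--             chars.append(c)
--     if abs(len(chars) - len(nums)) > 1:
--         return ""
--     if len(chars) < len(nums):
--         chars.insert(0, "")  # 注意先后顺序
--     if len(nums) < len(chars):
--         nums.append("")
--     res = []
--     for c, n in zip(chars, nums):
--         res.append(c)
--         res.append(n)
--     return "".join(res)
-- ===== SOURCE B (Python) =====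
-- def format_str_num1(origin):
--     digits = sum(c.isdigit() for c in origin)
--     letters = len(origin) - digits
--     if abs(letters - digits) > 1:
--         return ""
--     digit_leads = digits > letters
--     slotted = []
--     seen_d = 0
--     seen_l = 0
--     for c in origin:
--         if c.isdigit():
--             slotted.append((2 * seen_d + (0 if digit_leads else 1), c))
--             seen_d += 1
--         else:
--             slotted.append((2 * seen_l + (1 if digit_leads else 0), c))
--             seen_l += 1
--     slotted.sort(key=lambda t: t[0])
--     return "".join(c for _, c in slotted)
-- ===== Notes on version B (the rewrite author's own statement) =====
-- stated objective: alternative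
-- what changed: Replaces A's partition-into-two-lists + sentinel-padding + zip-interleave by a decorate-sort-undecorate scheme: one pass assigns each character its output slot (2k or 2k+1 via two running counters), then a sort by slot orders the characters and they are joined.
import Mathlib
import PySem

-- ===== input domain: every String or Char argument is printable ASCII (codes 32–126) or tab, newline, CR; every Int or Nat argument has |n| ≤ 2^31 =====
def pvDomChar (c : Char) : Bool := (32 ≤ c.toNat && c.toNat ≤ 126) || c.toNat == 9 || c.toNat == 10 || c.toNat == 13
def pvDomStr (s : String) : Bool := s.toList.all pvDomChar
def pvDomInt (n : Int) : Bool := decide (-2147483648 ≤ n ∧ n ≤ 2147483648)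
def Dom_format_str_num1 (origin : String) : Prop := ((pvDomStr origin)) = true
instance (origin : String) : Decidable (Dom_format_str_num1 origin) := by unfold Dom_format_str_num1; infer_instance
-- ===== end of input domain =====

-- B replaces A's partition + sentinel-padding + zip-interleave by decorate-sort-undecorate:
-- one pass assigns each character its output slot, then a sort by slot orders them (alternative).


-- ===== PORT A =====
-- chars/nums hold Python strings (single chars or the "" sentinel) → List (List Char)
def format_str_num1 (origin : String) : String :=
  let p := origin.toList.foldl
    (fun (p : List (List Char) × List (List Char)) c =>
      if PySem.Chars.isdigit c then (p.1, p.2 ++ [[c]]) else (p.1 ++ [[c]], p.2))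
    ([], [])
  let chars := p.1
  let nums := p.2
  if ((chars.length : Int) - (nums.length : Int)).natAbs > 1 then "" else
  let chars := if chars.length < nums.length then [] :: chars else chars
  let nums := if nums.length < chars.length then nums ++ [[]] else nums
  let res := (chars.zip nums).foldl (fun r p => r ++ [p.1, p.2]) []
  String.mk (PySem.Chars.join [] res)

-- ===== PORT B =====
-- single pass computes each character's output slot via two running counters; sort by slot; join
def format_str_num1_alt (origin : String) : String :=
  let s := origin.toList
  let digits : Int := s.foldl (fun a c => a + (if PySem.Chars.isdigit c then 1 else 0)) 0
  let letters : Int := (s.length : Int) - digits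
  if (letters - digits).natAbs > 1 then "" else
  let digitLeads : Bool := digits > letters
  let st := s.foldl
    (fun (st : Int × Int × List (Int × Char)) c =>
      if PySem.Chars.isdigit c then
        (st.1 + 1, st.2.1, st.2.2 ++ [(2 * st.1 + (if digitLeads then 0 else 1), c)])
      else
        (st.1, st.2.1 + 1, st.2.2 ++ [(2 * st.2.1 + (if digitLeads then 1 else 0), c)]))
    (0, 0, [])
  let sortedL := PySem.List.sorted st.2.2 (fun t => t.1) false
  String.mk (sortedL.map (fun t => t.2))

-- ===== PRECONDITION & SPEC =====
def Spec_format_str_num1 (origin : String) (out : String) : Prop := out = format_str_num1_alt origin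
instance (origin : String) (out : String) : Decidable (Spec_format_str_num1 origin out) := by unfold Spec_format_str_num1; infer_instance

-- ===== CLAIM (what is proved, stated in full; the proofs are below) =====
def Claim_equal_format_str_num1 : Prop := ∀ (origin : String), Dom_format_str_num1 origin → Spec_format_str_num1 origin (format_str_num1 origin)

-- ===== LEMMAS AND PROOFS =====

theorem join_nil_eq_flatten (cs : List (List Char)) : PySem.Chars.join [] cs = cs.flatten := by
  induction cs with
  | nil => rfl
  | cons h t ih => cases t <;> simp_all [PySem.Chars.join, List.intercalate]

/-- the intended interleaving: alternate, starting with the first list -/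
def weave : List Char → List Char → List Char
  | [], _ => []
  | c :: cs, ns => c :: weave ns cs
  termination_by cs ns => cs.length + ns.length
  decreasing_by simp; omega

/-- A's partition loop = two filters (as singleton strings) -/
theorem partition_foldl (l : List Char) (ca na : List (List Char)) :
    l.foldl (fun (p : List (List Char) × List (List Char)) c =>
      if PySem.Chars.isdigit c then (p.1, p.2 ++ [[c]]) else (p.1 ++ [[c]], p.2)) (ca, na)
    = (ca ++ (l.filter (fun c => !PySem.Chars.isdigit c)).map (fun c => [c]),
       na ++ (l.filter (fun c => PySem.Chars.isdigit c)).map (fun c => [c])) := by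
  induction l generalizing ca na with
  | nil => simp
  | cons c l ih =>
    by_cases h : PySem.Chars.isdigit c <;> simp [h, ih]

/-- equal lengths: zip-interleave = weave -/
theorem interleave_eq (cs ns : List Char) (h : ns.length = cs.length) :
    (((cs.map (fun c => [c])).zip (ns.map (fun c => [c]))).flatMap
        (fun (p : List Char × List Char) => [p.1, p.2])).flatten = weave cs ns := by
  induction cs generalizing ns with
  | nil =>
    have : ns = [] := by cases ns <;> simp_all
    subst this; simp [weave]
  | cons c cs' ih =>
    cases ns with
    | nil => simp at h
    | cons n ns' =>
      simp only [List.map_cons, List.zip_cons_cons, List.flatMap_cons]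
      rw [show weave (c :: cs') (n :: ns') = c :: n :: weave cs' ns' from by simp [weave]]
      simp [ih ns' (by simpa using h)]

/-- one more letter: zip-interleave with "" appended to nums = weave -/
theorem interleave_plus (cs ns : List Char) (h : cs.length = ns.length + 1) :
    (((cs.map (fun c => [c])).zip (ns.map (fun c => [c]) ++ [[]])).flatMap
        (fun (p : List Char × List Char) => [p.1, p.2])).flatten = weave cs ns := by
  induction cs generalizing ns with
  | nil => simp at h
  | cons c cs' ih =>
    cases ns with
    | nil =>
      have : cs' = [] := by cases cs' <;> simp_all
      subst this; simp [weave]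
    | cons n ns' =>
      simp only [List.map_cons, List.cons_append, List.zip_cons_cons, List.flatMap_cons]
      rw [show weave (c :: cs') (n :: ns') = c :: n :: weave cs' ns' from by simp [weave]]
      simp [ih ns' (by simpa using h)]

/-- one more digit: "" prepended to chars = weave with nums leading -/
theorem interleave_pad (cs ns : List Char) (h : ns.length = cs.length + 1) :
    ((([] :: cs.map (fun c => [c])).zip (ns.map (fun c => [c]))).flatMap
        (fun (p : List Char × List Char) => [p.1, p.2])).flatten = weave ns cs := by
  cases ns with
  | nil => simp at h
  | cons n ns' =>
    simp only [List.map_cons, List.zip_cons_cons, List.flatMap_cons]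
    rw [show weave (n :: ns') cs = n :: weave cs ns' from by simp [weave]]
    simp [interleave_eq cs ns' (by simpa using h)]

theorem filter_length_split (l : List Char) (p : Char → Bool) :
    (l.filter (fun c => !p c)).length + (l.filter p).length = l.length := by
  induction l with
  | nil => rfl
  | cons c t ih => by_cases h : p c <;> simp [h] <;> omega

/-- B's digit-count fold = length of the digit filter -/
theorem count_fold (l : List Char) (a : Int) :
    l.foldl (fun a c => a + (if PySem.Chars.isdigit c then 1 else 0)) a
      = a + ((l.filter (fun c => PySem.Chars.isdigit c)).length : Int) := by
  induction l generalizing a with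
  | nil => simp
  | cons c t ih => by_cases h : PySem.Chars.isdigit c <;> simp [h, ih] <;> push_cast <;> ring

/-- the slot-decorated list B's loop appends, as a recursion (od/ol = class offsets) -/
def deco (od ol : Int) : List Char → Int → Int → List (Int × Char)
  | [], _, _ => []
  | c :: t, sd, sl =>
    if PySem.Chars.isdigit c then
      (2 * sd + od, c) :: deco od ol t (sd + 1) sl
    else
      (2 * sl + ol, c) :: deco od ol t sd (sl + 1)

/-- B's main loop = deco -/
theorem foldB_eq (od ol : Int) (l : List Char) (sd sl : Int) (acc : List (Int × Char)) :
    l.foldl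
      (fun (st : Int × Int × List (Int × Char)) c =>
        if PySem.Chars.isdigit c then
          (st.1 + 1, st.2.1, st.2.2 ++ [(2 * st.1 + od, c)])
        else
          (st.1, st.2.1 + 1, st.2.2 ++ [(2 * st.2.1 + ol, c)]))
      (sd, sl, acc)
    = (sd + ((l.filter (fun c => PySem.Chars.isdigit c)).length : Int),
       sl + ((l.filter (fun c => !PySem.Chars.isdigit c)).length : Int),
       acc ++ deco od ol l sd sl) := by
  induction l generalizing sd sl acc with
  | nil => simp [deco]
  | cons c t ih =>
    by_cases h : PySem.Chars.isdigit c
    · simp only [List.foldl_cons, h, if_true, List.filter_cons, Bool.not_true, deco, ih,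
        List.length_cons, Prod.mk.injEq, Bool.false_eq_true, if_false]
      and_intros <;> first | (simp; done) | (push_cast; ring)
    · simp only [List.foldl_cons, h, if_true, List.filter_cons, Bool.not_false, deco, ih,
        List.length_cons, Prod.mk.injEq, Bool.false_eq_true, if_false]
      and_intros <;> first | (simp; done) | (push_cast; ring)

/-- one class of deco: keys 2*s+off, stepping s -/
def dec1 (off : Int) : List Char → Int → List (Int × Char)
  | [], _ => []
  | c :: t, s => (2 * s + off, c) :: dec1 off t (s + 1)

/-- deco is a merge of the two per-class decorations -/
theorem deco_perm (od ol : Int) (l : List Char) (sd sl : Int) :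
    (deco od ol l sd sl).Perm
      (dec1 od (l.filter (fun c => PySem.Chars.isdigit c)) sd ++
       dec1 ol (l.filter (fun c => !PySem.Chars.isdigit c)) sl) := by
  induction l generalizing sd sl with
  | nil => simp [deco, dec1]
  | cons c t ih =>
    by_cases h : PySem.Chars.isdigit c
    · simpa [deco, h, dec1] using (ih (sd + 1) sl).cons ((2 * sd + od, c))
    · simp only [deco, h, if_neg, List.filter_cons]
      simp only [h, Bool.false_eq_true, if_false, Bool.not_false, if_true, dec1]
      exact ((ih sd (sl + 1)).cons _).trans List.perm_middle.symm

/-- keyed weave: the target ordering with keys i, i+1, … -/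
def kw : List Char → List Char → Int → List (Int × Char)
  | [], _, _ => []
  | c :: cs, ns, i => (i, c) :: kw ns cs (i + 1)
  termination_by a b _ => a.length + b.length
  decreasing_by simp; omega

theorem kw_snd (a b : List Char) (i : Int) : (kw a b i).map (fun t => t.2) = weave a b := by
  induction h : a.length + b.length using Nat.strong_induction_on generalizing a b i with
  | _ n ih =>
    cases a with
    | nil => simp [kw, weave]
    | cons c cs =>
      rw [show kw (c :: cs) b i = (i, c) :: kw b cs (i + 1) from by simp [kw],
        show weave (c :: cs) b = c :: weave b cs from by simp [weave]]
      simp only [List.map_cons]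
      rw [ih (b.length + cs.length) (by simp at h; omega) b cs (i + 1) rfl]

theorem kw_key_ge (a b : List Char) (i : Int) : ∀ p ∈ kw a b i, i ≤ p.1 := by
  induction h : a.length + b.length using Nat.strong_induction_on generalizing a b i with
  | _ n ih =>
    intro p hp
    cases a with
    | nil => simp [kw] at hp
    | cons c cs =>
      rw [show kw (c :: cs) b i = (i, c) :: kw b cs (i + 1) from by simp [kw]] at hp
      rcases List.mem_cons.mp hp with h' | h'
      · simp [h']
      · have := ih (b.length + cs.length) (by simp at h; omega) b cs (i + 1) rfl p h'
        omega

theorem kw_pairwise (a b : List Char) (i : Int) :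
    (kw a b i).Pairwise (fun p q => p.1 < q.1) := by
  induction h : a.length + b.length using Nat.strong_induction_on generalizing a b i with
  | _ n ih =>
    cases a with
    | nil => simp [kw]
    | cons c cs =>
      rw [show kw (c :: cs) b i = (i, c) :: kw b cs (i + 1) from by simp [kw]]
      refine List.Pairwise.cons ?_ (ih (b.length + cs.length) (by simp at h; omega) b cs (i + 1) rfl)
      intro q hq
      have := kw_key_ge b cs (i + 1) q hq
      simp; omega

/-- the keyed weave is a permutation of the two per-class decorations -/
theorem kw_perm (a b : List Char) (h1 : b.length ≤ a.length) (h2 : a.length ≤ b.length + 1)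
    (s : Int) :
    (kw a b (2 * s)).Perm (dec1 0 a s ++ dec1 1 b s) ∧
    (kw a b (2 * s + 1)).Perm (dec1 1 a s ++ dec1 0 b (s + 1)) := by
  induction h : a.length + b.length using Nat.strong_induction_on generalizing a b s with
  | _ n ih =>
    cases a with
    | nil =>
      have : b = [] := by cases b <;> simp_all
      subst this; simp [kw, dec1]
    | cons c cs =>
      have hih := fun s' => ih (b.length + cs.length) (by simp at h; omega) b cs
        (by simp at h2 ⊢; omega) (by simp at h1 ⊢; omega) s' rfl
      constructor
      · rw [show kw (c :: cs) b (2 * s) = (2 * s, c) :: kw b cs (2 * s + 1) from by simp [kw],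
          show dec1 0 (c :: cs) s = (2 * s + 0, c) :: dec1 0 cs (s + 1) from rfl]
        simp only [add_zero, List.cons_append]
        exact ((hih s).2.trans (List.perm_append_comm)).cons _
      · rw [show kw (c :: cs) b (2 * s + 1) = (2 * s + 1, c) :: kw b cs (2 * s + 1 + 1) from by
            simp [kw],
          show (2 : Int) * s + 1 + 1 = 2 * (s + 1) from by ring,
          show dec1 1 (c :: cs) s = (2 * s + 1, c) :: dec1 1 cs (s + 1) from rfl]
        simp only [List.cons_append]
        exact ((hih (s + 1)).1.trans (List.perm_append_comm)).cons _

-- ===== VERDICT (by name: the statement is the Claim_ definition above) =====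
theorem format_str_num1_spec : Claim_equal_format_str_num1 := by
  intro origin _
  show format_str_num1 origin = format_str_num1_alt origin
  simp only [format_str_num1, format_str_num1_alt]
  rw [partition_foldl, count_fold]
  simp only [List.nil_append, List.length_map, zero_add]
  set l := origin.toList with hl
  set ns := l.filter (fun c => PySem.Chars.isdigit c) with hns
  set cs := l.filter (fun c => !PySem.Chars.isdigit c) with hcs
  have hn : cs.length + ns.length = l.length := filter_length_split l _
  have hg2 : ((l.length : Int) - ns.length - ns.length) = (cs.length : Int) - ns.length := by
    omega
  rw [hg2]
  by_cases hg : ((cs.length : Int) - (ns.length : Int)).natAbs > 1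
  · rw [if_pos hg, if_pos hg]
  · rw [if_neg hg, if_neg hg]
    by_cases hld : ns.length ≤ cs.length
    · have hdl : ¬ ((l.length : Int) - ns.length < (ns.length : Int)) := by omega
      simp only [hdl, decide_false, Bool.false_eq_true, if_false]
      rw [foldB_eq]
      simp only [List.nil_append]
      have hperm : (kw cs ns 0).Perm (deco 1 0 l 0 0) := by
        have := (kw_perm cs ns hld (by omega) 0).1
        rw [show (2 : Int) * 0 = 0 from by ring] at this
        exact (this.trans List.perm_append_comm).trans (deco_perm 1 0 l 0 0).symm
      rw [PySem.List.sorted_eq_of_perm_of_pairwise_lt _ _ _ hperm (kw_pairwise cs ns 0), kw_snd]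
      rw [if_neg (by omega)]
      simp only [List.length_map]
      by_cases hlt : ns.length < cs.length
      · rw [if_pos hlt, PySem.List.foldl_append_eq_flatMap, List.nil_append,
          join_nil_eq_flatten, interleave_plus cs ns (by omega)]
      · rw [if_neg hlt, PySem.List.foldl_append_eq_flatMap, List.nil_append,
          join_nil_eq_flatten, interleave_eq cs ns (by omega)]
    · have hdl : ((l.length : Int) - ns.length < (ns.length : Int)) := by omega
      simp only [hdl, decide_true, if_true]
      rw [foldB_eq]
      simp only [List.nil_append]
      have hperm : (kw ns cs 0).Perm (deco 0 1 l 0 0) := by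
        have := (kw_perm ns cs (by omega) (by omega) 0).1
        rw [show (2 : Int) * 0 = 0 from by ring] at this
        exact this.trans (deco_perm 0 1 l 0 0).symm
      rw [PySem.List.sorted_eq_of_perm_of_pairwise_lt _ _ _ hperm (kw_pairwise ns cs 0), kw_snd]
      rw [if_pos (by omega), if_neg (by simp; omega),
        PySem.List.foldl_append_eq_flatMap, List.nil_append,
        join_nil_eq_flatten, interleave_pad cs ns (by omega)]
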